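-- pv_equiv track=rewrite | github.com/juliemerborda4-tech/fakenews-guard | main_hybrid.py | predicates_conflict
-- ===== SOURCE A (Python) =====
-- def predicates_conflict(groups_a, groups_b):
--     if not groups_a or not groups_b: return False
--     conflicts = {("alive","dead"), ("arrested","released")}
--     for a in groups_a:
--         for b in groups_b:
--             if a == b: continue
--             if (a,b) in conflicts or (b,a) in conflicts:
--                 return True
--     return False
-- ===== SOURCE B (Python) =====
-- def predicates_conflict(groups_a, groups_b):
--     if not groups_a or not groups_b: return False
--     conflicts_full = (("alive", "dead"), ("dead", "alive"),
--                       ("arrested", "released"), ("released", "arrested"))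
--     for x, y in conflicts_full:
--         if x in groups_a and y in groups_b:
--             return True
--     return False
-- ===== Notes on version B (the rewrite author's own statement) =====
-- stated objective: faster
-- what changed: Instead of scanning every pair of elements of the two input lists against the conflict set, B iterates over the fixed 4-entry directed conflict table and tests membership of each side in the corresponding input list, so the per-pair nested inner scan disappears.
import Mathlib
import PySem

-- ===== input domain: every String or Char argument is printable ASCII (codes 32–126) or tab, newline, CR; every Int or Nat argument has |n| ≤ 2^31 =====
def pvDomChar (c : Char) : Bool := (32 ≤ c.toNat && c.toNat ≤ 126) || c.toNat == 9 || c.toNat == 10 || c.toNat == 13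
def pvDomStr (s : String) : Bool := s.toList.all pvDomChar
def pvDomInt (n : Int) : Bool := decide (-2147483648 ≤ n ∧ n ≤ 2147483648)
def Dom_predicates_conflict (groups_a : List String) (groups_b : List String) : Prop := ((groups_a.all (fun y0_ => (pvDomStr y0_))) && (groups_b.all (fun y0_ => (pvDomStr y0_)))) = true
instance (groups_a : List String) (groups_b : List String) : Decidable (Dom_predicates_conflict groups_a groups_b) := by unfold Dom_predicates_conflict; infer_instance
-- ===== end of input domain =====

-- B replaces A's nested scan over all element pairs by a single loop over the
-- fixed directed conflict table with membership tests in the inputs (objective: alternative).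

-- ===== PORT A =====
-- the unordered conflict set of A
def pvConflictsA : List (String × String) := [("alive", "dead"), ("arrested", "released")]

-- nested loop with early return: any over groups_a of any over groups_b
def predicates_conflict (groups_a : List String) (groups_b : List String) : Bool :=
  if groups_a = [] || groups_b = [] then false
  else
    groups_a.any (fun a =>
      groups_b.any (fun b =>
        if a = b then false
        else pvConflictsA.contains (a, b) || pvConflictsA.contains (b, a)))

-- ===== PORT B =====
-- the full directed conflict table of B
def pvConflictsFull : List (String × String) :=
  [("alive", "dead"), ("dead", "alive"), ("arrested", "released"), ("released", "arrested")]

-- loop over the constant table with early return: any with membership tests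
def predicates_conflict_alt (groups_a : List String) (groups_b : List String) : Bool :=
  if groups_a = [] || groups_b = [] then false
  else pvConflictsFull.any (fun p => groups_a.contains p.1 && groups_b.contains p.2)

-- ===== PRECONDITION & SPEC =====
def Spec_predicates_conflict (groups_a : List String) (groups_b : List String) (out : Bool) : Prop := out = predicates_conflict_alt groups_a groups_b
instance (groups_a : List String) (groups_b : List String) (out : Bool) : Decidable (Spec_predicates_conflict groups_a groups_b out) := by unfold Spec_predicates_conflict; infer_instance

-- ===== CLAIM (what is proved, stated in full; the proofs are below) =====
def Claim_equal_predicates_conflict : Prop := ∀ (groups_a : List String) (groups_b : List String), Dom_predicates_conflict groups_a groups_b → Spec_predicates_conflict groups_a groups_b (predicates_conflict groups_a groups_b)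

-- ===== LEMMAS AND PROOFS =====

theorem pv_any_iff (groups_a groups_b : List String) :
    (groups_a.any (fun a =>
      groups_b.any (fun b =>
        if a = b then false
        else pvConflictsA.contains (a, b) || pvConflictsA.contains (b, a))) = true)
    ↔ (pvConflictsFull.any (fun p => groups_a.contains p.1 && groups_b.contains p.2) = true) := by
  simp only [List.any_eq_true, pvConflictsA, pvConflictsFull, List.contains_eq_mem,
    List.mem_cons, List.not_mem_nil, or_false, Prod.mk.injEq, Bool.and_eq_true,
    decide_eq_true_eq]
  constructor
  · rintro ⟨a, ha, b, hb, h⟩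
    split_ifs at h with hab
    simp only [Bool.or_eq_true, decide_eq_true_eq] at h
    rcases h with (⟨h1, h2⟩ | ⟨h1, h2⟩) | (⟨h1, h2⟩ | ⟨h1, h2⟩)
    · exact ⟨("alive", "dead"), by simp, by subst h1 h2; exact ⟨ha, hb⟩⟩
    · exact ⟨("arrested", "released"), by simp, by subst h1 h2; exact ⟨ha, hb⟩⟩
    · exact ⟨("dead", "alive"), by simp, by subst h1 h2; exact ⟨ha, hb⟩⟩
    · exact ⟨("released", "arrested"), by simp, by subst h1 h2; exact ⟨ha, hb⟩⟩
  · rintro ⟨p, hp, ha, hb⟩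
    refine ⟨p.1, ha, p.2, hb, ?_⟩
    have hne : p.1 ≠ p.2 := by
      rcases hp with h | h | h | h <;> subst h <;> decide
    rw [if_neg hne]
    simp only [Bool.or_eq_true, decide_eq_true_eq]
    rcases hp with h | h | h | h <;> subst h <;> simp
-- ===== VERDICT (by name: the statement is the Claim_ definition above) =====
theorem predicates_conflict_spec : Claim_equal_predicates_conflict := by
  intro ga gb _
  unfold Spec_predicates_conflict predicates_conflict predicates_conflict_alt
  split_ifs with h
  · rfl
  · exact Bool.eq_iff_iff.mpr (pv_any_iff ga gb)
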